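-- pv_equiv track=rewrite | github.com/azure1016/MyLeetcodePython | lc51_n_queens.py | bit_to_string
-- ===== SOURCE A (Python) =====
-- def bit_to_string(bits, n):
--     res_str = ['.'] * n
--     mask = (1 << n) - 1
--     for i in range(n):
--         num = bits & (1 << i)  # get the n-i-th bit
--         if num: res_str[n - i - 1] = 'Q'
--     t = type(res_str)
--
--     return "".join(res_str)
-- ===== SOURCE B (Python) =====
-- def bit_to_string(bits, n):
--     sentinel = 1 << n
--     word = bin(sentinel + (bits % sentinel))[3:]
--     return word.translate(str.maketrans("10", "Q."))
-- ===== Notes on version B (the rewrite author's own statement) =====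
-- stated objective: idiomatic
-- what changed: B produces the whole row in one shot from the binary representation of the masked bitmask (sentinel bit forces the n-digit width, bin()[3:] strips it) and translates '1'/'0' to 'Q'/'.', instead of A's loop that index-assigns 'Q' into a pre-filled list cell by cell.
import Mathlib
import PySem

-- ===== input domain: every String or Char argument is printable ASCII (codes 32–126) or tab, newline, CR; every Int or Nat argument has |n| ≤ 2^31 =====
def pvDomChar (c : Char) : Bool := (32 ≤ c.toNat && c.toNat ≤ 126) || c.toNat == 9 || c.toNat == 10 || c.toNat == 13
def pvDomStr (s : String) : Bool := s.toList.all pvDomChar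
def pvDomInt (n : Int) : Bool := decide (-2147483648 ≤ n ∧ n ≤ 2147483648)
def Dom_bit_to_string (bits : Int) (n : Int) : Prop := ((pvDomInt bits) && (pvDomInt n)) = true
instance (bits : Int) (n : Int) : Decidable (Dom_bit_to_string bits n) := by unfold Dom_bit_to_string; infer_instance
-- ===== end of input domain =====

-- B builds the row in one shot from the binary representation of the masked bitmask
-- (sentinel-forced fixed width, then a character translation) instead of A's indexed
-- writes into a pre-filled list; objective: idiomatic, same linear cost.

-- ===== PORT A =====
def bit_to_string (bits : Int) (n : Int) : String :=
  let res_str : List Char := List.replicate n.toNat '.'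
  let _mask : Int := (1 <<< n.toNat) - 1   -- A computes `mask` but never uses it
  let res := (PySem.List.pyRange 0 n 1).foldl
    (fun r i =>
      let num := PySem.Int.band bits (1 <<< i.toNat)
      if num ≠ 0 then r.set (n - i - 1).toNat 'Q' else r)
    res_str
  String.mk res

-- ===== PORT B =====
-- bin(k) without the "0b" prefix, as a list of '0'/'1' chars ("" for k = 0)
def pvBinChars : Nat → List Char
  | 0 => []
  | (k+1) => pvBinChars ((k+1)/2) ++ [if (k+1) % 2 = 1 then '1' else '0']
decreasing_by exact Nat.div_lt_self (Nat.succ_pos k) (by omega)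

-- the translate table {'1' ↦ 'Q', '0' ↦ '.'}
def pvTranslate (c : Char) : Char := if c = '1' then 'Q' else if c = '0' then '.' else c

def bit_to_string_alt (bits : Int) (n : Int) : String :=
  let sentinel : Int := 1 <<< n.toNat
  let word : List Char := (pvBinChars (sentinel + PySem.Int.mod bits sentinel).toNat).drop 1
  String.mk (word.map pvTranslate)

-- ===== PRECONDITION & SPEC =====
-- Python raises ValueError ("negative shift count") from `1 << n` when n < 0, in A and in B alike.
def Pre_bit_to_string (bits : Int) (n : Int) : Prop := 0 ≤ n
instance (bits : Int) (n : Int) : Decidable (Pre_bit_to_string bits n) := by unfold Pre_bit_to_string; infer_instance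
def pvWitness_bit_to_string : Int × Int := (5, 4)

def Spec_bit_to_string (bits : Int) (n : Int) (out : String) : Prop := out = bit_to_string_alt bits n
instance (bits : Int) (n : Int) (out : String) : Decidable (Spec_bit_to_string bits n out) := by unfold Spec_bit_to_string; infer_instance

-- ===== CLAIM (what is proved, stated in full; the proofs are below) =====
def Claim_equal_bit_to_string : Prop := ∀ (bits : Int) (n : Int), Dom_bit_to_string bits n → Pre_bit_to_string bits n → Spec_bit_to_string bits n (bit_to_string bits n)

-- ===== LEMMAS AND PROOFS =====

lemma pv_shl_cast (i : Nat) : ((1 <<< i : Nat) : Int) = (2:Int)^i := by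
  rw [Nat.shiftLeft_eq, one_mul]; push_cast; ring

lemma pvTestBit (x i : Nat) : x.testBit i = decide (x / 2^i % 2 = 1) := by
  induction i generalizing x with
  | zero => simpa using Nat.testBit_zero x
  | succ i ih =>
    rw [← Nat.testBit_div_two, ih, Nat.div_div_eq_div_mul, ← pow_succ']

lemma pvTopBit (i x : Nat) (hx : x < 2^(i+1)) : x.testBit i = decide (2^i ≤ x) := by
  have hp : 0 < 2^i := by positivity
  have h1 : x / 2^i < 2 := by
    rw [Nat.div_lt_iff_lt_mul hp]
    have h2 : 2^(i+1) = 2^i * 2 := by ring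
    omega
  have h2 : (1 ≤ x / 2^i) ↔ 2^i ≤ x := by
    rw [Nat.le_div_iff_mul_le hp]; omega
  rw [pvTestBit]
  rw [decide_eq_decide]
  generalize ht : x / 2^i = t at h1 h2
  omega

lemma pvModBit (x j : Nat) : x.testBit j = decide (2^j ≤ x % 2^(j+1)) := by
  rw [show x.testBit j = (x % 2^(j+1)).testBit j by rw [Nat.testBit_mod_two_pow]; simp]
  exact pvTopBit j _ (Nat.mod_lt _ (by positivity))

lemma pvBandTest (bits : Int) (i : Nat) :
    (PySem.Int.band bits ((1 <<< i : Nat) : Int) ≠ 0) ↔ 2^i ≤ (bits % ((2:Int)^(i+1))).toNat := by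
  rw [pv_shl_cast]
  have hip : (0:Int) < 2^i := by positivity
  have h2ip : 0 < 2^i := by positivity
  have hA2 : 2^(i+1) = 2 * 2^i := by ring
  have hcast : ((2:Int)^i) = ((2^i : Nat) : Int) := by push_cast; ring
  have hcast1 : ((2:Int)^(i+1)) = ((2^(i+1) : Nat) : Int) := by push_cast; ring
  by_cases hb : (0:Int) ≤ bits
  · rw [PySem.Int.band_of_nonneg hb (le_of_lt hip)]
    have h1 : ((2:Int)^i).toNat = 2^i := by rw [hcast]; exact Int.toNat_natCast _
    rw [h1, Nat.and_two_pow]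
    have h2 : (bits % ((2:Int)^(i+1))).toNat = bits.toNat % 2^(i+1) := by
      rw [hcast1, Int.toNat_emod hb (by positivity), Int.toNat_natCast]
    rw [h2, pvModBit bits.toNat i]
    by_cases hP : 2^i ≤ bits.toNat % 2^(i+1)
    · simp only [hP, decide_true, Bool.toNat_true, one_mul, iff_true]
      exact_mod_cast pow_ne_zero i (two_ne_zero)
    · simp [hP]
  · have hb' : bits < 0 := by omega
    set k : Nat := (-bits - 1).toNat with hk
    have hband : PySem.Int.band bits ((2:Int)^i) = ((2^i - (2^i &&& k) : Nat) : Int) := by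
      simp only [PySem.Int.band]
      rw [if_neg (by omega), if_pos (le_of_lt hip)]
      rw [hcast, Int.toNat_natCast]
    have hr : k % 2^(i+1) < 2^(i+1) := Nat.mod_lt _ (by positivity)
    have hmod : bits % ((2:Int)^(i+1)) = ((2^(i+1) - 1 - k % 2^(i+1) : Nat) : Int) := by
      have hkb : bits = -((k:Int)+1) := by omega
      have hdm : 2^(i+1) * (k / 2^(i+1)) + k % 2^(i+1) = k := Nat.div_add_mod k (2^(i+1))
      have hP : ((2^(i+1) : Nat) : Int) * ((k / 2^(i+1) : Nat) : Int) + ((k % 2^(i+1) : Nat) : Int) = (k : Int) := by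
        exact_mod_cast hdm
      have hsub : ((2^(i+1) - 1 - k % 2^(i+1) : Nat) : Int) = ((2^(i+1) : Nat) : Int) - 1 - ((k % 2^(i+1) : Nat) : Int) := by
        omega
      have hstep : bits = ((2^(i+1) - 1 - k % 2^(i+1) : Nat) : Int)
          + ((2^(i+1) : Nat) : Int) * (-(((k / 2^(i+1) : Nat) : Int) + 1)) := by
        rw [hsub]; linear_combination hkb + hP
      rw [hcast1, hstep, Int.add_mul_emod_self_left, Int.emod_eq_of_lt (by omega) (by omega)]
    rw [hband, hmod, Int.toNat_natCast, Nat.two_pow_and, pvModBit k i]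
    by_cases hP : 2^i ≤ k % 2^(i+1)
    · simp only [hP, decide_true, Bool.toNat_true, mul_one]
      simp only [Nat.sub_self, Nat.cast_zero, ne_eq, not_true_eq_false, false_iff]
      omega
    · simp only [hP, decide_false, Bool.toNat_false, mul_zero, Nat.sub_zero, ne_eq]
      constructor
      · intro _; omega
      · intro _
        exact_mod_cast pow_ne_zero i (two_ne_zero)

lemma pvBandBit (bits : Int) (N i : Nat) (hi : i < N) :
    (PySem.Int.band bits ((1 <<< i : Nat) : Int) ≠ 0) ↔ ((bits % ((2:Int)^N)).toNat).testBit i := by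
  rw [pvBandTest]
  have hNpos : (0:Int) < 2^N := by positivity
  have hm0 : 0 ≤ bits % ((2:Int)^N) := Int.emod_nonneg bits (by positivity)
  have hdvd : ((2:Int)^(i+1)) ∣ ((2:Int)^N) := pow_dvd_pow 2 (by omega)
  have hkey : bits % ((2:Int)^(i+1)) = (bits % ((2:Int)^N)) % ((2:Int)^(i+1)) := by
    rw [Int.emod_emod_of_dvd bits hdvd]
  set m : Nat := (bits % ((2:Int)^N)).toNat with hm
  have hcast1 : ((2:Int)^(i+1)) = ((2^(i+1) : Nat) : Int) := by push_cast; ring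
  have hcastm : bits % ((2:Int)^N) = (m : Int) := by omega
  have h2 : (bits % ((2:Int)^(i+1))).toNat = m % 2^(i+1) := by
    rw [hkey, hcastm, hcast1]
    have : ((m:Int)) % (((2^(i+1) : Nat)) : Int) = ((m % 2^(i+1) : Nat) : Int) := by push_cast; rfl
    rw [this]; omega
  rw [h2, pvModBit m i]
  simp

lemma pvFoldlCongr {α β : Type} (l : List β) (f g : α → β → α) (b : α)
    (h : ∀ a : α, ∀ x ∈ l, f a x = g a x) : l.foldl f b = l.foldl g b := by
  induction l generalizing b with
  | nil => rfl
  | cons x xs ih =>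
    simp only [List.foldl_cons]
    rw [h b x (by simp)]
    exact ih _ (fun a y hy => h a y (by simp [hy]))

-- A's loop invariant: after the first k iterations exactly the last k cells are decided
lemma pvFoldA (bits : Int) (N : Nat) (m : Nat) (hm : m = (bits % ((2:Int)^N)).toNat)
    (k : Nat) (hk : k ≤ N) :
    (List.range k).foldl
      (fun r (i : Nat) => if PySem.Int.band bits ((1 <<< i : Nat) : Int) ≠ 0 then r.set (N-1-i) 'Q' else r)
      (List.replicate N '.')
    = (List.range N).map (fun j => if N - k ≤ j ∧ m.testBit (N-1-j) then 'Q' else '.') := by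
  induction k with
  | zero =>
    simp only [List.range_zero, List.foldl_nil]
    apply List.ext_getElem
    · simp
    · intro j h1 h2
      have hj : j < N := by simpa using h1
      simp only [List.getElem_replicate, List.getElem_map, List.getElem_range]
      rw [if_neg (by omega)]
  | succ k ih =>
    have hbit := pvBandBit bits N k (by omega)
    rw [List.range_succ, List.foldl_append, ih (by omega), List.foldl_cons, List.foldl_nil]
    by_cases hb : PySem.Int.band bits ((1 <<< k : Nat) : Int) ≠ 0
    · rw [if_pos hb]
      have hbt : m.testBit k = true := by rw [hm]; exact (hbit.mp hb)
      apply List.ext_getElem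
      · simp
      · intro j h1 h2
        have hj : j < N := by simpa using h2
        rw [List.getElem_set]
        simp only [List.getElem_map, List.getElem_range]
        by_cases hje : N - 1 - k = j
        · rw [if_pos hje, if_pos]
          refine ⟨by omega, ?_⟩
          rw [show N - 1 - j = k by omega]
          exact hbt
        · rw [if_neg hje]
          by_cases hbit2 : m.testBit (N-1-j) = true
          · simp only [hbit2, and_true]
            by_cases h3 : N - k ≤ j
            · rw [if_pos h3, if_pos (by omega)]
            · rw [if_neg h3, if_neg (by omega)]
          · simp [hbit2]
    · rw [if_neg hb]
      have hbt : m.testBit k = false := by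
        rw [hm]
        by_contra hc
        simp only [Bool.not_eq_false] at hc
        exact hb (hbit.mpr hc)
      apply List.map_congr_left
      intro j hj
      have hjN : j < N := List.mem_range.mp hj
      by_cases hbit2 : m.testBit (N-1-j) = true
      · simp only [hbit2, and_true]
        have hne : j ≠ N - 1 - k := by
          intro hEq
          rw [show N - 1 - j = k by omega] at hbit2
          rw [hbt] at hbit2
          exact Bool.false_ne_true hbit2
        by_cases h3 : N - k ≤ j
        · rw [if_pos h3, if_pos (by omega)]
        · rw [if_neg h3, if_neg (by omega)]
      · simp [hbit2]

lemma pvBinChars_pos (x : Nat) (hx : 0 < x) :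
    pvBinChars x = pvBinChars (x/2) ++ [if x % 2 = 1 then '1' else '0'] := by
  cases x with
  | zero => exact absurd hx (by omega)
  | succ k => rw [pvBinChars]

lemma pvBinChars_spec (N m : Nat) (hm : m < 2^N) :
    pvBinChars (2^N + m) = '1' :: (List.range N).map (fun j => if m.testBit (N-1-j) then '1' else '0') := by
  induction N generalizing m with
  | zero =>
    have hm0 : m = 0 := by simp at hm; omega
    subst hm0
    rw [show 2^0 + 0 = 1 by norm_num, pvBinChars_pos 1 one_pos]
    simp [pvBinChars]
  | succ N ih =>
    have h2 : 2^(N+1) = 2*2^N := by ring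
    rw [pvBinChars_pos _ (by positivity)]
    have hdiv : (2^(N+1) + m)/2 = 2^N + m/2 := by omega
    have hmod : (2^(N+1) + m) % 2 = m % 2 := by omega
    rw [hdiv, hmod, ih (m/2) (by omega), List.range_succ, List.map_append]
    simp only [List.cons_append, List.map_cons, List.map_nil]
    congr 1
    congr 1
    · apply List.map_congr_left
      intro j hj
      have hjN : j < N := List.mem_range.mp hj
      rw [Nat.testBit_div_two, show N - 1 - j + 1 = N + 1 - 1 - j by omega]
    · rw [show N + 1 - 1 - N = 0 by omega]
      simp [Nat.testBit_zero]

-- ===== VERDICT (by name: the statement is the Claim_ definition above) =====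
theorem bit_to_string_spec : Claim_equal_bit_to_string := by
  intro bits n _ hpre
  have hpre' : (0:Int) ≤ n := hpre
  obtain ⟨N, rfl⟩ := Int.eq_ofNat_of_zero_le hpre'
  show bit_to_string bits ↑N = bit_to_string_alt bits ↑N
  have hNpos : (0:Int) < 2^N := by positivity
  have h2Nc : ((2:Int)^N) = ((2^N : Nat) : Int) := by push_cast; ring
  have hm0 : 0 ≤ bits % ((2:Int)^N) := Int.emod_nonneg bits (by positivity)
  have hmlt : bits % ((2:Int)^N) < 2^N := Int.emod_lt_of_pos bits hNpos
  set m : Nat := (bits % ((2:Int)^N)).toNat with hm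
  have hcastm : bits % ((2:Int)^N) = (m : Int) := by omega
  have hmlt' : m < 2^N := by omega
  -- A's side
  have hA : bit_to_string bits ↑N
      = String.mk ((List.range N).map (fun j => if m.testBit (N-1-j) then 'Q' else '.')) := by
    simp only [bit_to_string, Int.toNat_natCast]
    rw [PySem.List.pyRange_one 0 ↑N]
    rw [show ((N:Int) - 0).toNat = N by omega]
    rw [List.foldl_map]
    rw [pvFoldlCongr (List.range N) _
      (fun r (i : Nat) => if PySem.Int.band bits ((1 <<< i : Nat) : Int) ≠ 0 then r.set (N-1-i) 'Q' else r)
      (List.replicate N '.') ?_]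
    · rw [pvFoldA bits N m hm N le_rfl]
      simp only [Nat.sub_self, Nat.zero_le, true_and]
    · intro a x hx
      have hxN : x < N := List.mem_range.mp hx
      simp only [zero_add, Int.toNat_natCast]
      rw [show ((N:Int) - ↑x - 1).toNat = N - 1 - x by omega]
  -- B's side
  have hB : bit_to_string_alt bits ↑N
      = String.mk ((List.range N).map (fun j => if m.testBit (N-1-j) then 'Q' else '.')) := by
    simp only [bit_to_string_alt, Int.toNat_natCast]
    rw [pv_shl_cast, PySem.Int.mod_eq_emod_of_pos hNpos, hcastm]
    rw [show (((2:Int)^N) + (m:Int)).toNat = 2^N + m by omega]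
    rw [pvBinChars_spec N m hmlt']
    simp only [List.drop_succ_cons, List.drop_zero, List.map_map]
    apply congrArg String.mk
    apply List.map_congr_left
    intro j hj
    by_cases hb : m.testBit (N-1-j) = true <;> simp [pvTranslate, hb, Function.comp]
  show bit_to_string bits ↑N = bit_to_string_alt bits ↑N
  rw [hA, hB]
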